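-- pv_equiv track=rewrite | github.com/Gwenn01/PYTHON-CODING-PART1 | FacorialOfDigits.py | factorialOfDigits
-- ===== SOURCE A (Python) =====
-- def factorialOfDigits(n):
--     temp = n
--     count = 0
--     while temp > 0:
--         count += 1
--         temp //= 10
--     result = 0
--     while n > 0:
--         rem = n % 10
--         c = count
--         multiply = 1
--         while c > 0:
--             multiply *= rem
--             c -= 1
--         result += multiply
--         n //= 10
--     return result
-- ===== SOURCE B (Python) =====
-- def factorialOfDigits(n):
--     freq = [0] * 10
--     count = 0
--     while n > 0:
--         freq[n % 10] += 1
--         count += 1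
--         n //= 10
--     return sum(c * v ** count for v, c in enumerate(freq))
-- ===== Notes on version B (the rewrite author's own statement) =====
-- stated objective: alternative
-- what changed: Builds a ten-slot digit-frequency histogram in one pass (simultaneously counting digits), then computes the result as sum over the ten digit values of count[v]*v**count, so the per-digit repeated-multiplication exponentiation loop of A disappears (at most ten pow evaluations regardless of digit multiplicity).
import Mathlib
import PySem

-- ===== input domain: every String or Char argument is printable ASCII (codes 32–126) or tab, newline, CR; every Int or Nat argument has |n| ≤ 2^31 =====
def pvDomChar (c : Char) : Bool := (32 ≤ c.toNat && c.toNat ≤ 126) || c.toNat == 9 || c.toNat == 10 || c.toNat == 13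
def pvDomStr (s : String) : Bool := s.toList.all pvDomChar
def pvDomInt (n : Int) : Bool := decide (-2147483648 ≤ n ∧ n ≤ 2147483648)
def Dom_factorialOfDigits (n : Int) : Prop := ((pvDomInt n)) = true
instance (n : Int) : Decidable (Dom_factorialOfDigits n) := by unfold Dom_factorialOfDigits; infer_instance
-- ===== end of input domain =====

-- B builds a ten-slot digit-frequency histogram in one pass, then sums count[v]*v**count over the ten values; same values as A, no speed claim.

-- ===== PORT A =====

-- termination helper for the `// 10` loops (positive dividend shrinks)
theorem pvFdiv10_lt (t : Int) (h : 0 < t) : (PySem.Int.floordiv t 10).toNat < t.toNat := by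
  have he : PySem.Int.floordiv t 10 = t / 10 := by
    simp [PySem.Int.floordiv, Int.fdiv_eq_ediv_of_nonneg]
  rw [he]; omega

-- while temp > 0: count += 1; temp //= 10
def pvCountGo (temp count : Int) : Int :=
  if h : temp > 0 then pvCountGo (PySem.Int.floordiv temp 10) (count + 1) else count
termination_by temp.toNat
decreasing_by exact pvFdiv10_lt temp h

-- while c > 0: multiply *= rem; c -= 1
def pvMultGo (rem c multiply : Int) : Int :=
  if c > 0 then pvMultGo rem (c - 1) (multiply * rem) else multiply
termination_by c.toNat
decreasing_by omega

-- while n > 0: rem = n % 10; … ; result += multiply; n //= 10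
def pvMainGo (n count result : Int) : Int :=
  if h : n > 0 then
    pvMainGo (PySem.Int.floordiv n 10) count (result + pvMultGo (PySem.Int.mod n 10) count 1)
  else result
termination_by n.toNat
decreasing_by exact pvFdiv10_lt n h

def factorialOfDigits (n : Int) : Int :=
  pvMainGo n (pvCountGo n 0) 0

-- ===== PORT B =====

-- while n > 0: freq[n % 10] += 1; count += 1; n //= 10
-- (the index n % 10 is always in 0..9, so List.set / getD are exact for `freq[n % 10] += 1`)
def pvFreqGo (n : Int) (freq : List Int) (count : Int) : List Int × Int :=
  if h : n > 0 then
    pvFreqGo (PySem.Int.floordiv n 10)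
      (freq.set (PySem.Int.mod n 10).toNat (freq.getD (PySem.Int.mod n 10).toNat 0 + 1))
      (count + 1)
  else (freq, count)
termination_by n.toNat
decreasing_by exact pvFdiv10_lt n h

-- sum(c * v ** count for v, c in enumerate(freq))
def factorialOfDigits_alt (n : Int) : Int :=
  let fc := pvFreqGo n (List.replicate 10 0) 0
  (PySem.List.enumerate fc.1).foldl (fun acc vc => acc + vc.2 * vc.1 ^ fc.2.toNat) 0

-- ===== PRECONDITION & SPEC =====
def Spec_factorialOfDigits (n : Int) (out : Int) : Prop := out = factorialOfDigits_alt n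
instance (n : Int) (out : Int) : Decidable (Spec_factorialOfDigits n out) := by unfold Spec_factorialOfDigits; infer_instance

-- ===== CLAIM =====
def Claim_equal_factorialOfDigits : Prop := ∀ (n : Int), Dom_factorialOfDigits n → Spec_factorialOfDigits n (factorialOfDigits n)

-- ===== LEMMAS AND PROOFS =====

theorem pvCountGo_eq : ∀ (m : ℕ) (c : Int), pvCountGo (m : Int) c = c + (Nat.digits 10 m).length := by
  intro m
  induction m using Nat.strong_induction_on with
  | _ m ih =>
    intro c
    rcases Nat.eq_zero_or_pos m with h | h
    · subst h; rw [pvCountGo]; simp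
    · rw [pvCountGo, dif_pos (by exact_mod_cast h)]
      have he : PySem.Int.floordiv (m : Int) 10 = ((m / 10 : ℕ) : Int) := by
        simp [PySem.Int.floordiv, Int.fdiv_eq_ediv_of_nonneg]
      rw [he, ih (m / 10) (by omega), Nat.digits_def' (by norm_num) h]
      simp; omega

theorem pvMultGo_eq (rem : Int) : ∀ (k : ℕ) (acc : Int), pvMultGo rem (k : Int) acc = acc * rem ^ k := by
  intro k
  induction k with
  | zero => intro acc; rw [pvMultGo]; simp
  | succ k ih =>
    intro acc
    rw [pvMultGo, if_pos (by omega)]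
    have : ((k : Int) + 1) - 1 = (k : Int) := by ring
    simp only [Nat.cast_add, Nat.cast_one, this, ih]
    ring

theorem pvMainGo_eq : ∀ (m : ℕ) (count result : Int),
    pvMainGo (m : Int) count result
      = result + ((Nat.digits 10 m).map (fun d => pvMultGo ((d : ℕ) : Int) count 1)).sum := by
  intro m
  induction m using Nat.strong_induction_on with
  | _ m ih =>
    intro count result
    rcases Nat.eq_zero_or_pos m with h | h
    · subst h; rw [pvMainGo]; simp
    · rw [pvMainGo, dif_pos (by exact_mod_cast h)]
      have he : PySem.Int.floordiv (m : Int) 10 = ((m / 10 : ℕ) : Int) := by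
        simp [PySem.Int.floordiv, Int.fdiv_eq_ediv_of_nonneg]
      have hm : PySem.Int.mod (m : Int) 10 = ((m % 10 : ℕ) : Int) := by
        simp [PySem.Int.mod, Int.fmod_eq_emod]
      rw [he, hm, ih (m / 10) (by omega), Nat.digits_def' (by norm_num) h]
      simp; ring

-- B's loop = fold of the histogram step over the base-10 digit list, counting along
def pvStep (f : List Int) (d : ℕ) : List Int := f.set d (f.getD d 0 + 1)

theorem pvFreqGo_eq : ∀ (m : ℕ) (freq : List Int) (c : Int),
    pvFreqGo (m : Int) freq c = ((Nat.digits 10 m).foldl pvStep freq, c + (Nat.digits 10 m).length) := by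
  intro m
  induction m using Nat.strong_induction_on with
  | _ m ih =>
    intro freq c
    rcases Nat.eq_zero_or_pos m with h | h
    · subst h; rw [pvFreqGo]; simp
    · rw [pvFreqGo, dif_pos (by exact_mod_cast h)]
      have he : PySem.Int.floordiv (m : Int) 10 = ((m / 10 : ℕ) : Int) := by
        simp [PySem.Int.floordiv, Int.fdiv_eq_ediv_of_nonneg]
      have hm : (PySem.Int.mod (m : Int) 10).toNat = m % 10 := by
        simp [PySem.Int.mod, Int.fmod_eq_emod]
        omega
      rw [he, hm, ih (m / 10) (by omega), Nat.digits_def' (by norm_num) h]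
      simp [pvStep]
      omega

-- the histogram sum, with general enumeration start
def pvSumB (K : ℕ) (s : Int) (freq : List Int) : Int :=
  ((PySem.List.enumerate freq s).map (fun vc => vc.2 * vc.1 ^ K)).sum

theorem pvSumB_set : ∀ (freq : List Int) (d : ℕ) (s : Int) (K : ℕ), d < freq.length →
    pvSumB K s (pvStep freq d) = pvSumB K s freq + (s + (d : Int)) ^ K := by
  intro freq
  induction freq with
  | nil => intro d s K h; simp at h
  | cons a t ih =>
    intro d s K h
    cases d with
    | zero =>
      simp [pvSumB, pvStep, PySem.List.enumerate_cons]
      ring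
    | succ j =>
      have hj : j < t.length := by simpa using h
      have := ih j (s + 1) K hj
      simp only [pvSumB, pvStep] at *
      simp only [List.set_cons_succ, PySem.List.enumerate_cons, List.map_cons, List.sum_cons,
        List.getD_cons_succ]
      rw [this]
      push_cast
      ring

theorem pvStep_length (f : List Int) (d : ℕ) : (pvStep f d).length = f.length := by
  simp [pvStep]

theorem pvSumB_foldl : ∀ (l : List ℕ), (∀ d ∈ l, d < 10) → ∀ (freq : List Int), freq.length = 10 →
    ∀ (K : ℕ), pvSumB K 0 (l.foldl pvStep freq) = pvSumB K 0 freq + (l.map (fun d : ℕ => (d : Int) ^ K)).sum := by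
  intro l
  induction l with
  | nil => intro _ freq _ K; simp
  | cons d t ih =>
    intro hlt freq hlen K
    simp only [List.foldl_cons, List.map_cons, List.sum_cons]
    rw [ih (fun x hx => hlt x (List.mem_cons_of_mem _ hx)) (pvStep freq d)
        (by rw [pvStep_length, hlen]) K,
      pvSumB_set freq d 0 K (by rw [hlen]; exact hlt d (List.mem_cons_self))]
    ring

theorem pvSumB_zeros (K : ℕ) : pvSumB K 0 (List.replicate 10 0) = 0 := by
  simp [pvSumB, List.replicate, PySem.List.enumerate_cons, PySem.List.enumerate_nil]

theorem pvFoldlMapSum (K : ℕ) : ∀ (l : List (Int × Int)) (acc : Int),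
    l.foldl (fun a vc => a + vc.2 * vc.1 ^ K) acc = acc + (l.map (fun vc => vc.2 * vc.1 ^ K)).sum := by
  intro l
  induction l with
  | nil => intro acc; simp
  | cons p t ih => intro acc; simp [List.foldl_cons, ih]; ring

theorem factorialOfDigits_eq (n : Int) : factorialOfDigits n = factorialOfDigits_alt n := by
  by_cases hpos : 0 < n
  · have hm : n = ((n.toNat : ℕ) : Int) := by omega
    set m := n.toNat with hmdef
    have hdig : ∀ d ∈ Nat.digits 10 m, d < 10 := fun d hd => Nat.digits_lt_base (by norm_num) hd
    have hA : factorialOfDigits n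
        = ((Nat.digits 10 m).map (fun d : ℕ => (d : Int) ^ (Nat.digits 10 m).length)).sum := by
      rw [factorialOfDigits, hm, pvCountGo_eq, pvMainGo_eq]
      simp only [zero_add]
      congr 1
      apply List.map_congr_left
      intro d _
      rw [pvMultGo_eq, one_mul]
    have hB : factorialOfDigits_alt n
        = ((Nat.digits 10 m).map (fun d : ℕ => (d : Int) ^ (Nat.digits 10 m).length)).sum := by
      rw [factorialOfDigits_alt, hm, pvFreqGo_eq]
      have hK : ((0 : Int) + ((Nat.digits 10 m).length : Int)).toNat = (Nat.digits 10 m).length := by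
        omega
      simp only [pvFoldlMapSum, Int.zero_add, Int.toNat_natCast]
      have : ((PySem.List.enumerate ((Nat.digits 10 m).foldl pvStep (List.replicate 10 0)) 0).map
          (fun vc => vc.2 * vc.1 ^ (Nat.digits 10 m).length)).sum
          = pvSumB (Nat.digits 10 m).length 0 ((Nat.digits 10 m).foldl pvStep (List.replicate 10 0)) := rfl
      rw [this, pvSumB_foldl (Nat.digits 10 m) hdig (List.replicate 10 0) (by simp), pvSumB_zeros]
      simp
    rw [hA, hB]
  · rw [factorialOfDigits, pvMainGo, dif_neg (by omega),
      factorialOfDigits_alt, pvFreqGo, dif_neg (by omega)]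
    decide

-- ===== VERDICT =====
theorem factorialOfDigits_spec : Claim_equal_factorialOfDigits := by
  intro n _
  exact factorialOfDigits_eq n
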